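-- pv_equiv track=rewrite | github.com/jfflanagan/coding-examples | coding-exercises/kmp.py | generate_prefixes
-- ===== SOURCE A (Python) =====
-- def generate_prefixes(pattern):
--     borders = [0]*len(pattern)
--     border = 0
--     for i in range(1, len(pattern)):
--         while border > 0 and pattern[i] != pattern[border]:
--             border = borders[border - 1]
--
--         if pattern[i] == pattern[border]:
--             border += 1
--         else:
--             border = 0
--
--         borders[i] = border
--
--     return borders
-- ===== SOURCE B (Python) =====
-- def generate_prefixes(pattern):
--     n = len(pattern)
--     borders = []
--     for i in range(n):
--         b = 0
--         for length in range(i, 0, -1):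
--             t = 0
--             while t < length and pattern[t] == pattern[i - length + 1 + t]:
--                 t += 1
--             if t == length:
--                 b = length
--                 break
--         borders.append(b)
--     return borders
-- ===== Notes on version B (the rewrite author's own statement) =====
-- stated objective: alternative
-- what changed: Replaces KMP's failure-link while-loop (border = borders[border-1] jumps carrying state across iterations) with an independent definition-based search: at each index i it scans candidate border lengths from i down to 1 and returns the first length whose prefix matches the suffix ending at i character by character.
import Mathlib
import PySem

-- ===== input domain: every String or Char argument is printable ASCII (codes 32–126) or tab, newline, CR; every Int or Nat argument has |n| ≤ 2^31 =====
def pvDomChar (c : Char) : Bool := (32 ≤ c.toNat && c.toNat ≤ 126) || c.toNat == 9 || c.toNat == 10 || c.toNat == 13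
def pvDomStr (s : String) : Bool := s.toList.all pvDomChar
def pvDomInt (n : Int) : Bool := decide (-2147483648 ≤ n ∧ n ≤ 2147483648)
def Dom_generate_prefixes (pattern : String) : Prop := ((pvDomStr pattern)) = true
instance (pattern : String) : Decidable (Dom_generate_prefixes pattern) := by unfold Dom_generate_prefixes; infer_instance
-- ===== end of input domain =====

-- B replaces KMP's failure-link while-loop by a direct longest-border scan at each index
-- (definition-based re-implementation; objective: alternative, not faster).


-- ===== PORT A =====
-- A's `while border > 0 and pattern[i] != pattern[border]: border = borders[border-1]`.
-- `fuel` only makes the recursion total; fuel = len(pattern) is never exhausted in a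
-- reachable state (each iteration strictly decreases `border`, proved below).
-- All list/character indices of A are in range in every reachable state, so `getD` is exact there.
def kmpWhile (l : List Char) (borders : List Int) (i : Nat) : Nat → Int → Int
  | 0, border => border
  | fuel+1, border =>
    if border > 0 ∧ ¬ (l.getD i ' ' = l.getD border.toNat ' ') then
      kmpWhile l borders i fuel (borders.getD (border.toNat - 1) 0)
    else border

-- body of A's `for i in range(1, len(pattern))` loop; state = (borders, border)
def kmpStep (l : List Char) (st : List Int × Int) (i : Nat) : List Int × Int :=
  let b := kmpWhile l st.1 i l.length st.2
  let b' := if l.getD i ' ' = l.getD b.toNat ' ' then b + 1 else 0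
  (st.1.set i b', b')

def generate_prefixes (pattern : String) : List Int :=
  ((List.range' 1 (pattern.toList.length - 1)).foldl (kmpStep pattern.toList)
    (List.replicate pattern.toList.length 0, 0)).1

-- ===== PORT B =====
-- B's innermost loop `while t < length and pattern[t] == pattern[i - length + 1 + t]: t += 1`;
-- returns the final value of t. All indices are in range on B's calls, so `getD` is exact there.
def scanT (l : List Char) (i length : Nat) (t : Nat) : Nat :=
  if t < length ∧ l.getD t ' ' = l.getD (i - length + 1 + t) ' ' then scanT l i length (t+1)
  else t
termination_by length - t
decreasing_by omega

-- B's middle loop `for length in range(i, 0, -1): ... if t == length: b = length; break`,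
-- descending; the recursion argument is the current `length`.
def findB (l : List Char) (i : Nat) : Nat → Nat
  | 0 => 0
  | k+1 => if scanT l i (k+1) 0 = k+1 then k+1 else findB l i k

def generate_prefixes_alt (pattern : String) : List Int :=
  (List.range pattern.toList.length).map (fun i => (findB pattern.toList i i : Int))

-- ===== PRECONDITION & SPEC =====
def Spec_generate_prefixes (pattern : String) (out : List Int) : Prop := out = generate_prefixes_alt pattern
instance (pattern : String) (out : List Int) : Decidable (Spec_generate_prefixes pattern out) := by unfold Spec_generate_prefixes; infer_instance

-- ===== CLAIM (what is proved, stated in full; the proofs are below) =====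
def Claim_equal_generate_prefixes : Prop := ∀ (pattern : String), Dom_generate_prefixes pattern → Spec_generate_prefixes pattern (generate_prefixes pattern)

-- ===== LEMMAS AND PROOFS =====

-- `bord l j m`: the prefix of l of length m is a proper border of the prefix of length j.
def bord (l : List Char) (j m : Nat) : Prop := m < j ∧ l.take m <:+ l.take j

-- B's test for length m at index i: the inner while loop ran through.
def condB (l : List Char) (i m : Nat) : Prop := scanT l i m 0 = m

-- characterisation of the inner while loop
lemma scanT_iff (l : List Char) (i L : Nat) : ∀ n t, t + n = L →
    (scanT l i L t = L ↔ ∀ u, t ≤ u → u < L → l.getD u ' ' = l.getD (i - L + 1 + u) ' ') := by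
  intro n
  induction n with
  | zero =>
    intro t ht
    have htL : t = L := by omega
    subst htL
    unfold scanT
    rw [if_neg (by omega)]
    constructor
    · intro _ u h1 h2; omega
    · intro _; rfl
  | succ n ih =>
    intro t ht
    have htL : t < L := by omega
    unfold scanT
    by_cases hc : l.getD t ' ' = l.getD (i - L + 1 + t) ' '
    · rw [if_pos ⟨htL, hc⟩]
      rw [ih (t+1) (by omega)]
      constructor
      · intro h u h1 h2
        rcases Nat.eq_or_lt_of_le h1 with he | hlt
        · rw [← he]; exact hc
        · exact h u hlt h2
      · intro h u h1 h2
        exact h u (by omega) h2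
    · rw [if_neg (by intro h; exact hc h.2)]
      constructor
      · intro h; omega
      · intro h; exact absurd (h t (le_refl t) htL) hc

lemma take_concat (l : List Char) (t : Nat) (ht : t < l.length) :
    l.take (t+1) = l.take t ++ [l.getD t ' '] := by
  rw [List.take_add_one, List.getElem?_eq_getElem ht, List.getD_eq_getElem _ _ ht]
  rfl

-- the pointwise test equals prefix-of-length-m = suffix-of-length-m of the prefix of length i+1
lemma pointwise_iff_slice (l : List Char) (i m : Nat) (hm : m ≤ i) (hi : i < l.length) :
    (∀ u, u < m → l.getD u ' ' = l.getD (i - m + 1 + u) ' ') ↔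
      l.take m = (l.take (i+1)).drop (i + 1 - m) := by
  have hlen1 : (l.take (i+1)).length = i + 1 := by rw [List.length_take]; omega
  have hlen2 : (l.take m).length = m := by rw [List.length_take]; omega
  constructor
  · intro h
    apply List.ext_getElem
    · rw [hlen2, List.length_drop, hlen1]; omega
    · intro u h1 h2
      rw [hlen2] at h1
      have hu1 : u < l.length := by omega
      have hu2 : i + 1 - m + u < i + 1 := by omega
      have hu3 : i + 1 - m + u < l.length := by omega
      rw [List.getElem_take, List.getElem_drop, List.getElem_take]
      have := h u h1
      rw [List.getD_eq_getElem _ _ hu1, List.getD_eq_getElem _ _ (by omega : i - m + 1 + u < l.length)] at this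
      rw [this]
      congr 1
      omega
  · intro h u hu
    have h1 := List.getElem_of_eq h (by omega : u < (l.take m).length)
    rw [List.getElem_take, List.getElem_drop, List.getElem_take] at h1
    rw [List.getD_eq_getElem _ _ (by omega : u < l.length),
      List.getD_eq_getElem _ _ (by omega : i - m + 1 + u < l.length)]
    rw [h1]
    congr 1
    omega

lemma condB_iff_bord (l : List Char) (i m : Nat) (_h1 : 1 ≤ m) (hm : m ≤ i)
    (hi : i < l.length) : condB l i m ↔ bord l (i+1) m := by
  unfold condB bord
  rw [scanT_iff l i m m 0 (by omega)]
  have hp := pointwise_iff_slice l i m hm hi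
  have hlen1 : (l.take (i+1)).length = i + 1 := by
    rw [List.length_take]; omega
  have hlen2 : (l.take m).length = m := by
    rw [List.length_take]; omega
  constructor
  · intro h
    have hs := hp.mp (fun u hu => h u (Nat.zero_le u) hu)
    exact ⟨by omega, hs ▸ List.drop_suffix _ _⟩
  · rintro ⟨-, hs⟩
    have heq := List.suffix_iff_eq_drop.mp hs
    rw [hlen1, hlen2] at heq
    intro u _ hu
    exact hp.mpr heq u hu

lemma bord_trans (l : List Char) (i b m : Nat) (h1 : bord l i b) (h2 : bord l b m) :
    bord l i m := ⟨by have := h1.1; have := h2.1; omega, h2.2.trans h1.2⟩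

lemma bord_cotrans (l : List Char) (i b m : Nat) (hi : i ≤ l.length)
    (h1 : bord l i m) (h2 : bord l i b) (hmb : m < b) : bord l b m := by
  have hbi : b < i := h2.1
  have hleni : (l.take i).length = i := by rw [List.length_take]; omega
  have hlenb : (l.take b).length = b := by rw [List.length_take]; omega
  have hlenm : (l.take m).length = m := by rw [List.length_take]; omega
  have em : l.take m = (l.take i).drop (i - m) := by
    have := List.suffix_iff_eq_drop.mp h1.2; rwa [hleni, hlenm] at this
  have eb : l.take b = (l.take i).drop (i - b) := by
    have := List.suffix_iff_eq_drop.mp h2.2; rwa [hleni, hlenb] at this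
  refine ⟨hmb, List.suffix_iff_eq_drop.mpr ?_⟩
  rw [hlenb, hlenm, eb, List.drop_drop, em]
  congr 1
  omega

lemma suffix_concat_iff (a b : List Char) (x y : Char) :
    a ++ [x] <:+ b ++ [y] ↔ x = y ∧ a <:+ b := by
  rw [← List.reverse_prefix]
  simp only [List.reverse_append, List.reverse_cons, List.reverse_nil, List.nil_append,
    List.singleton_append]
  rw [List.cons_prefix_cons, List.reverse_prefix]

lemma bord_ext (l : List Char) (i k : Nat) (hi : i < l.length) (hk : k < i) :
    bord l (i+1) (k+1) ↔ bord l i k ∧ l.getD k ' ' = l.getD i ' ' := by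
  unfold bord
  rw [take_concat l k (by omega), take_concat l i hi, suffix_concat_iff]
  constructor
  · rintro ⟨-, hxy, hs⟩
    exact ⟨⟨hk, hs⟩, hxy⟩
  · rintro ⟨⟨-, hs⟩, hxy⟩
    exact ⟨by omega, hxy, hs⟩

lemma bord_zero (l : List Char) (i : Nat) (h : 1 ≤ i) : bord l i 0 :=
  ⟨h, by simp⟩

lemma findB_le (l : List Char) (i : Nat) : ∀ k, findB l i k ≤ k := by
  intro k; induction k with
  | zero => simp [findB]
  | succ k ih => unfold findB; split <;> omega

lemma findB_spec (l : List Char) (i : Nat) : ∀ k,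
    (findB l i k = 0 ∨ condB l i (findB l i k)) ∧
    (∀ m, findB l i k < m → m ≤ k → ¬ condB l i m) := by
  intro k; induction k with
  | zero =>
    refine ⟨Or.inl rfl, ?_⟩
    intro m h1 h2 _; omega
  | succ k ih =>
    unfold findB
    split
    · rename_i h
      refine ⟨Or.inr h, ?_⟩
      intro m h1 h2; omega
    · rename_i h
      refine ⟨ih.1, ?_⟩
      intro m h1 h2
      rcases Nat.lt_or_ge m (k+1) with hm | hm
      · exact ih.2 m h1 (by omega)
      · have hmk : m = k + 1 := by omega
        subst hmk
        exact h

lemma findB_eq_of (l : List Char) (i : Nat) : ∀ k (b : Nat), b ≤ k →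
    (b = 0 ∨ condB l i b) → (∀ m, b < m → m ≤ k → ¬ condB l i m) →
    findB l i k = b := by
  intro k; induction k with
  | zero => intro b hb _ _; unfold findB; omega
  | succ k ih =>
    intro b hb hcond hmax
    unfold findB
    split
    · rename_i h
      by_contra hne
      exact hmax (k+1) (by omega) (le_refl _) h
    · rename_i h
      apply ih b
      · rcases Nat.lt_or_ge b (k+1) with h1 | h1
        · omega
        · exfalso
          have hbk : b = k+1 := by omega
          subst hbk
          rcases hcond with h0 | hc
          · omega
          · exact h hc
      · exact hcond
      · intro m h1 h2; exact hmax m h1 (by omega)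

-- the value B computes at index i, as a Nat
def AV (l : List Char) (i : Nat) : Nat := findB l i i

lemma AV_bordmax (l : List Char) (i : Nat) (hi : i < l.length) :
    (AV l i = 0 ∨ bord l (i+1) (AV l i)) ∧ (∀ m, bord l (i+1) m → m ≤ AV l i) := by
  have hs := findB_spec l i i
  have hle := findB_le l i i
  constructor
  · by_cases hz : AV l i = 0
    · exact Or.inl hz
    · right
      rcases hs.1 with h0 | hc
      · exact absurd h0 hz
      · have h1 : 1 ≤ findB l i i := by unfold AV at hz; omega
        exact (condB_iff_bord l i _ h1 hle hi).mp hc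
  · intro m hm
    by_contra hlt
    have hlt' : AV l i < m := by omega
    have hm1 : 1 ≤ m := by omega
    have hmi : m ≤ i := by have := hm.1; omega
    exact hs.2 m hlt' hmi ((condB_iff_bord l i m hm1 hmi hi).mpr hm)

lemma AV_eq_of (l : List Char) (i : Nat) (hi : i < l.length) (b : Nat)
    (h1 : b = 0 ∨ bord l (i+1) b) (h2 : ∀ m, bord l (i+1) m → m ≤ b) :
    AV l i = b := by
  have hble : b ≤ i := by
    rcases h1 with h0 | hb
    · omega
    · have := hb.1; omega
  apply findB_eq_of l i i b hble
  · by_cases hb0 : b = 0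
    · exact Or.inl hb0
    · rcases h1 with h0 | hb
      · exact Or.inl h0
      · exact Or.inr ((condB_iff_bord l i b (by omega) hble hi).mpr hb)
  · intro m hm1 hm2 hc
    have hbm : bord l (i+1) m := (condB_iff_bord l i m (by omega) hm2 hi).mp hc
    have := h2 m hbm
    omega

lemma AV_zero (l : List Char) : AV l 0 = 0 := rfl

-- A's while loop: from a chain element b with all larger borders mismatching, it reaches
-- the largest border whose next character matches (or 0).
lemma kmpWhile_spec (l : List Char) (borders : List Int) (i : Nat)
    (hi1 : 1 ≤ i) (hi : i < l.length)
    (hbord : ∀ j, j < i → borders.getD j 0 = (AV l j : Int)) :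
    ∀ fuel (b : Nat), b ≤ fuel →
    bord l i b →
    (∀ m, bord l i m → b < m → ¬ (l.getD i ' ' = l.getD m ' ')) →
    ∃ rn : Nat, kmpWhile l borders i fuel (b : Int) = (rn : Int) ∧
      bord l i rn ∧
      (rn = 0 ∨ l.getD i ' ' = l.getD rn ' ') ∧
      (∀ m, bord l i m → rn < m → ¬ (l.getD i ' ' = l.getD m ' ')) := by
  intro fuel
  induction fuel with
  | zero =>
    intro b hb hbrd hmax
    have hb0 : b = 0 := by omega
    subst hb0
    exact ⟨0, rfl, hbrd, Or.inl rfl, hmax⟩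
  | succ fuel ih =>
    intro b hb hbrd hmax
    unfold kmpWhile
    by_cases hcond : ((b : Int) > 0 ∧ ¬ (l.getD i ' ' = l.getD (b : Int).toNat ' '))
    · rw [if_pos hcond]
      have hb0 : 0 < b := by exact_mod_cast hcond.1
      have hbi : b < i := hbrd.1
      have htn : (b : Int).toNat = b := Int.toNat_natCast b
      have hget : borders.getD ((b : Int).toNat - 1) 0 = (AV l (b-1) : Int) := by
        rw [htn]; exact hbord (b-1) (by omega)
      rw [hget]
      have hmaxb := AV_bordmax l (b-1) (by omega)
      have hb1 : b - 1 + 1 = b := by omega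
      rw [hb1] at hmaxb
      have hb2b : AV l (b-1) < b := by
        rcases hmaxb.1 with h0 | hb'
        · omega
        · exact hb'.1
      apply ih (AV l (b-1)) (by omega)
      · rcases hmaxb.1 with h0 | hb'
        · rw [h0]; exact bord_zero l i hi1
        · exact bord_trans l i b (AV l (b-1)) hbrd hb'
      · intro m hm hgt
        rcases Nat.lt_or_ge b m with h | h
        · exact hmax m hm h
        · rcases Nat.eq_or_lt_of_le h with he | hlt
          · rw [htn] at hcond
            rw [he]
            exact hcond.2
          · exfalso
            have hmb : bord l b m := bord_cotrans l i b m (by omega) hm hbrd hlt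
            have := hmaxb.2 m hmb
            omega
    · rw [if_neg hcond]
      refine ⟨b, rfl, hbrd, ?_, hmax⟩
      by_cases hb0 : b = 0
      · exact Or.inl hb0
      · right
        by_contra hne
        apply hcond
        constructor
        · exact_mod_cast Nat.pos_of_ne_zero hb0
        · rwa [Int.toNat_natCast]

-- one step of A's outer loop computes AV l i
lemma kmpStep_spec (l : List Char) (borders : List Int) (i : Nat)
    (hi1 : 1 ≤ i) (hi : i < l.length)
    (hbord : ∀ j, j < i → borders.getD j 0 = (AV l j : Int)) :
    kmpStep l (borders, (AV l (i-1) : Int)) i = (borders.set i (AV l i : Int), (AV l i : Int)) := by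
  have hmaxp := AV_bordmax l (i-1) (by omega)
  have hi1' : i - 1 + 1 = i := by omega
  rw [hi1'] at hmaxp
  have hentry_bord : bord l i (AV l (i-1)) := by
    rcases hmaxp.1 with h0 | hb
    · rw [h0]; exact bord_zero l i hi1
    · exact hb
  have hentry_max : ∀ m, bord l i m → AV l (i-1) < m → ¬ (l.getD i ' ' = l.getD m ' ') := by
    intro m hm hgt _
    have := hmaxp.2 m hm
    omega
  have hfuel : AV l (i-1) ≤ l.length := by
    have := findB_le l (i-1) (i-1)
    unfold AV; omega
  obtain ⟨rn, hrun, hrb, hexit, hrmax⟩ :=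
    kmpWhile_spec l borders i hi1 hi hbord l.length (AV l (i-1)) hfuel hentry_bord hentry_max
  unfold kmpStep
  simp only [hrun]
  rw [Int.toNat_natCast]
  by_cases hmatch : l.getD i ' ' = l.getD rn ' '
  · rw [if_pos hmatch]
    have hval : AV l i = rn + 1 := by
      apply AV_eq_of l i hi
      · right
        rw [bord_ext l i rn hi hrb.1]
        exact ⟨hrb, hmatch.symm⟩
      · intro m hm
        rcases m with _ | k
        · omega
        · have hki : k < i := by have := hm.1; omega
          rw [bord_ext l i k hi hki] at hm
          by_contra hgt
          exact hrmax k hm.1 (by omega) hm.2.symm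
    rw [hval]
    norm_cast
  · rw [if_neg hmatch]
    have hrn0 : rn = 0 := by
      rcases hexit with h0 | hc
      · exact h0
      · exact absurd hc hmatch
    subst hrn0
    have hval : AV l i = 0 := by
      apply AV_eq_of l i hi
      · exact Or.inl rfl
      · intro m hm
        rcases m with _ | k
        · omega
        · exfalso
          have hki : k < i := by have := hm.1; omega
          rw [bord_ext l i k hi hki] at hm
          rcases Nat.eq_zero_or_pos k with hk0 | hk0
          · subst hk0
            exact hmatch hm.2.symm
          · exact hrmax k hm.1 hk0 hm.2.symm
    rw [hval]
    rfl

-- the borders list after processing indices 1..i-1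
def bordersAt (l : List Char) (i : Nat) : List Int :=
  (List.range l.length).map (fun j => if j < i then (AV l j : Int) else 0)

lemma bordersAt_getD (l : List Char) (i j : Nat) (hj : j < i) (hjl : j < l.length) :
    (bordersAt l i).getD j 0 = (AV l j : Int) := by
  unfold bordersAt
  rw [List.getD_eq_getElem _ _ (by simpa using hjl)]
  simp [hj]

lemma bordersAt_set (l : List Char) (i : Nat) (_hi : i < l.length) :
    (bordersAt l i).set i (AV l i : Int) = bordersAt l (i+1) := by
  apply List.ext_getElem
  · simp [bordersAt]
  · intro j h1 h2
    have hjl : j < l.length := by simpa [bordersAt] using h2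
    rw [List.getElem_set]
    unfold bordersAt
    simp only [List.getElem_map, List.getElem_range]
    by_cases hij : i = j
    · subst hij; simp
    · rw [if_neg hij]
      split_ifs <;> first | rfl | omega

lemma bordersAt_one (l : List Char) : bordersAt l 1 = List.replicate l.length 0 := by
  unfold bordersAt
  rw [List.map_congr_left (g := fun _ => (0 : Int)), List.map_const', List.length_range]
  intro j hj
  split_ifs with h
  · have hj0 : j = 0 := by omega
    subst hj0
    rw [AV_zero]; rfl
  · rfl

lemma fold_spec (l : List Char) (hl : 1 ≤ l.length) : ∀ k, k ≤ l.length - 1 →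
    (List.range' 1 k).foldl (kmpStep l) (List.replicate l.length 0, 0) =
      (bordersAt l (k+1), (AV l k : Int)) := by
  intro k
  induction k with
  | zero =>
    intro _
    rw [bordersAt_one, AV_zero]
    rfl
  | succ k ih =>
    intro hk
    rw [List.range'_1_concat, List.foldl_append, ih (by omega), List.foldl_cons, List.foldl_nil]
    have h1k : 1 + k = k + 1 := by omega
    rw [h1k]
    have hki : k + 1 < l.length := by omega
    have hstep := kmpStep_spec l (bordersAt l (k+1)) (k+1) (by omega) hki
      (fun j hj => bordersAt_getD l (k+1) j hj (by omega))
    have hkk : k + 1 - 1 = k := by omega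
    rw [hkk] at hstep
    rw [hstep, bordersAt_set l (k+1) hki]

-- ===== VERDICT (by name: the statement is the Claim_ definition above) =====
theorem generate_prefixes_spec : Claim_equal_generate_prefixes := by
  intro pattern _
  unfold Spec_generate_prefixes generate_prefixes generate_prefixes_alt
  generalize pattern.toList = l
  by_cases hn : l.length = 0
  · simp [hn]
  · have h1 : 1 ≤ l.length := by omega
    rw [fold_spec l h1 (l.length - 1) (le_refl _)]
    have he : l.length - 1 + 1 = l.length := by omega
    rw [he]
    unfold bordersAt
    apply List.map_congr_left
    intro j hj
    simp only [List.mem_range] at hj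
    simp [hj, AV]
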